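-- pv_equiv track=rewrite | github.com/drfuera/BiteWise | py/timeline_tab.py | process_journal_data
-- ===== SOURCE A (Python) =====
-- from collections import defaultdict
--
-- def process_journal_data(journal_data):
--     """Organize journal entries by date"""
--     timeline_data = defaultdict(list)
--     for entry in journal_data:
--         if isinstance(entry, dict) and entry.get('date') and entry.get('timestamp'):
--             timeline_data[entry['date']].append(entry)
--
--     # Sort entries by timestamp within each date
--     for date in timeline_data:
--         timeline_data[date].sort(key=lambda x: x.get('timestamp', ''))
--
--     return timeline_data
-- ===== SOURCE B (Python) =====
-- from collections import defaultdict
--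
-- def process_journal_data(journal_data):
--     """Organize journal entries by date"""
--     valid = [e for e in journal_data
--              if isinstance(e, dict) and e.get('date') and e.get('timestamp')]
--     timeline = defaultdict(list)
--     for date in dict.fromkeys(e['date'] for e in valid):
--         timeline[date] = []
--     for e in sorted(valid, key=lambda x: x.get('timestamp', '')):
--         timeline[e['date']].append(e)
--     return timeline
-- ===== Notes on version B (the rewrite author's own statement) =====
-- stated objective: alternative
-- what changed: A groups entries into a defaultdict and then sorts each date's list separately; B filters once, does a single global stable sort by timestamp, and then distributes the sorted entries into date buckets pre-registered in first-occurrence order (stability makes each bucket come out identically sorted).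
import Mathlib
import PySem

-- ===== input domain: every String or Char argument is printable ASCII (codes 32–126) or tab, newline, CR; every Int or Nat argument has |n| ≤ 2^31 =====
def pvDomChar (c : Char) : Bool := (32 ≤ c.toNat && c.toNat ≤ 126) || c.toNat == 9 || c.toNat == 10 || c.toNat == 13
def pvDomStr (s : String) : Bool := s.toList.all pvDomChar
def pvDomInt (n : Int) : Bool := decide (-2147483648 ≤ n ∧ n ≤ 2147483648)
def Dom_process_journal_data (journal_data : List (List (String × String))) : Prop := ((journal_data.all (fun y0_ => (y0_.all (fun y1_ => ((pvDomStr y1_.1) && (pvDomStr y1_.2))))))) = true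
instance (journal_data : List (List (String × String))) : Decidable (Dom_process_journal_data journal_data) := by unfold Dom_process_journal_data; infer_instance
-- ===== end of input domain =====

-- B replaces A's per-date sorts by one global stable sort followed by grouping (same cost class, different decomposition).


-- ===== PORT A =====
-- entry.get('date') / entry.get('timestamp') truthiness: missing key and '' are both falsy,
-- so `getD … ""` followed by a ≠ "" test is exact; under the guard entry['date'] = getD "date" "".
def pjKeep (e : List (String × String)) : Bool :=
  ((PySem.Dict.mk e).getD "date" "" != "") && ((PySem.Dict.mk e).getD "timestamp" "" != "")
def pjDate (e : List (String × String)) : String := (PySem.Dict.mk e).getD "date" ""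
-- sort key lambda x: x.get('timestamp', '')
def pjTs (e : List (String × String)) : String := (PySem.Dict.mk e).getD "timestamp" ""

-- defaultdict(list) + append is Dict.modify _ [] (· ++ [e]); the final per-date in-place sort
-- is a map over the dict's items, returned as the association list.
def process_journal_data (journal_data : List (List (String × String))) : List (String × List (List (String × String))) :=
  let timeline := journal_data.foldl
    (fun d e => if pjKeep e then d.modify (pjDate e) [] (fun v => v ++ [e]) else d)
    (PySem.Dict.empty : PySem.Dict String (List (List (String × String))))
  (timeline.items).map (fun kv => (kv.1, PySem.List.sorted kv.2 pjTs))

-- ===== PORT B =====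
def process_journal_data_alt (journal_data : List (List (String × String))) : List (String × List (List (String × String))) :=
  let valid := journal_data.filter pjKeep
  -- dict.fromkeys(...) is PySem.List.dedup; registering each date with an empty list
  let d0 := (PySem.List.dedup (valid.map pjDate)).foldl
    (fun d k => d.insert k ([] : List (List (String × String))))
    (PySem.Dict.empty : PySem.Dict String (List (List (String × String))))
  let d1 := (PySem.List.sorted valid pjTs).foldl
    (fun d e => d.modify (pjDate e) [] (fun v => v ++ [e])) d0
  d1.items

-- ===== PRECONDITION & SPEC =====
def Spec_process_journal_data (journal_data : List (List (String × String))) (out : List (String × List (List (String × String)))) : Prop := out = process_journal_data_alt journal_data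
instance (journal_data : List (List (String × String))) (out : List (String × List (List (String × String)))) : Decidable (Spec_process_journal_data journal_data out) := by unfold Spec_process_journal_data; infer_instance

-- ===== CLAIM (what is proved, stated in full; the proofs are below) =====
def Claim_equal_process_journal_data : Prop := ∀ (journal_data : List (List (String × String))), Dom_process_journal_data journal_data → Spec_process_journal_data journal_data (process_journal_data journal_data)

-- ===== LEMMAS AND PROOFS =====

-- x inserted before every element strictly greater under the key lands at the front
theorem insertBy_front {α κ : Type} [LinearOrder κ] (key : α → κ) (x : α) (l : List α)
    (h : ∀ z ∈ l, key x < key z) :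
    PySem.List.insertBy (fun a b => decide (key a < key b)) x l = x :: l := by
  cases l with
  | nil => simp [PySem.List.insertBy]
  | cons y ys => simp [PySem.List.insertBy, h y (by simp)]

-- filter commutes with a stable insertion into a key-sorted list
theorem filter_insertBy {α κ : Type} [LinearOrder κ] (p : α → Bool) (key : α → κ) (x : α)
    (ys : List α) (hs : ys.Pairwise (fun a b => key a ≤ key b)) :
    (PySem.List.insertBy (fun a b => decide (key a < key b)) x ys).filter p =
      if p x then PySem.List.insertBy (fun a b => decide (key a < key b)) x (ys.filter p)
      else ys.filter p := by
  induction ys with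
  | nil => by_cases hp : p x <;> simp [PySem.List.insertBy, hp]
  | cons y ys ih =>
    rcases List.pairwise_cons.mp hs with ⟨hy, hs'⟩
    by_cases h1 : key x < key y
    · have hfront : PySem.List.insertBy (fun a b => decide (key a < key b)) x ((y :: ys).filter p)
          = x :: (y :: ys).filter p := by
        apply insertBy_front
        intro z hz
        have hz' := List.mem_filter.mp hz |>.1
        rcases List.mem_cons.mp hz' with hz2 | hz2
        · exact hz2 ▸ h1
        · exact lt_of_lt_of_le h1 (hy z hz2)
      by_cases hp : p x
      · rw [if_pos hp, hfront]
        simp [PySem.List.insertBy, h1, List.filter_cons, hp]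
      · rw [if_neg hp]
        simp [PySem.List.insertBy, h1, List.filter_cons, hp]
    · have step : PySem.List.insertBy (fun a b => decide (key a < key b)) x (y :: ys)
          = y :: PySem.List.insertBy (fun a b => decide (key a < key b)) x ys := by
        simp [PySem.List.insertBy, h1]
      rw [step]
      by_cases hp : p x <;> by_cases hpy : p y <;>
        simp [hp, hpy, ih hs', PySem.List.insertBy, h1]

-- filter commutes with the stable sort
theorem filter_sorted {α κ : Type} [LinearOrder κ] (p : α → Bool) (key : α → κ) (xs : List α) :
    (PySem.List.sorted xs key).filter p = PySem.List.sorted (xs.filter p) key := by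
  induction xs using List.reverseRecOn with
  | nil => simp [PySem.List.sorted]
  | append_singleton l x ih =>
    have hsort : ∀ (m : List α), PySem.List.sorted (m ++ [x]) key
        = PySem.List.insertBy (fun a b => decide (key a < key b)) x (PySem.List.sorted m key) := by
      intro m
      rw [PySem.List.sorted_eq_foldl_insertBy, PySem.List.sorted_eq_foldl_insertBy, List.foldl_append]
      rfl
    rw [hsort, filter_insertBy p key x _ (PySem.List.sorted_pairwise l key), List.filter_append]
    by_cases hp : p x
    · simp [hp, ih, hsort]
    · simp [hp, ih]

-- every d0 value is []
theorem getD_foldl_insert_nil {ν : Type} (l : List String)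
    (d : PySem.Dict String (List ν)) (h : ∀ k, d.getD k [] = []) :
    ∀ k, (l.foldl (fun d k' => d.insert k' ([] : List ν)) d).getD k [] = [] := by
  induction l generalizing d with
  | nil => exact h
  | cons a l ih =>
    intro k
    refine ih _ ?_ k
    intro k'
    rw [PySem.Dict.getD_insert]
    split <;> simp [h]

-- updating a set with elements it already has changes nothing
theorem set_update_of_subset {α : Type} [BEq α] [LawfulBEq α] (l : List α) (s : PySem.Set α)
    (h : ∀ x ∈ l, x ∈ s) : PySem.Set.update s l = s := by
  induction l generalizing s with
  | nil => rfl
  | cons a l ih =>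
    have ha : PySem.Set.add s a = s := by
      have hc : a ∈ s := h a (by simp)
      simp [PySem.Set.add, hc]
    show PySem.Set.update (PySem.Set.add s a) l = s
    rw [ha]
    exact ih s (fun x hx => h x (by simp [hx]))

-- the defaultdict-append loop groups: each key's final value is base ++ the matching entries in order
theorem grouped_getD (m : List (List (String × String)))
    (d : PySem.Dict String (List (List (String × String)))) (k : String) :
    (m.foldl (fun d e => d.modify (pjDate e) [] (fun v => v ++ [e])) d).getD k []
      = d.getD k [] ++ m.filter (fun e => pjDate e == k) := by
  have h1 : m.foldl (fun d e => d.modify (pjDate e) [] (fun v => v ++ [e])) d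
      = (m.map (fun e => (pjDate e, e))).foldl (fun d p => d.modify p.1 [] (fun v => v ++ [p.2])) d := by
    rw [List.foldl_map]
  rw [h1, PySem.Dict.getD_foldl_modify_append]
  congr 1
  rw [List.filter_map, List.map_map]
  simp [Function.comp_def]

-- ===== VERDICT (by name: the statement is the Claim_ definition above) =====
theorem process_journal_data_spec : Claim_equal_process_journal_data := by
  intro jd _
  show process_journal_data jd = process_journal_data_alt jd
  simp only [process_journal_data, process_journal_data_alt]
  rw [PySem.List.foldl_if_eq_foldl_filter]
  set valid := jd.filter pjKeep with hvalid
  set S := PySem.List.sorted valid pjTs with hS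
  set K : List String := PySem.Set.ofList (valid.map pjDate) with hK
  set tl := valid.foldl (fun d e => d.modify (pjDate e) [] (fun v => v ++ [e]))
      (PySem.Dict.empty : PySem.Dict String (List (List (String × String)))) with htl
  set d0 := (PySem.List.dedup (valid.map pjDate)).foldl
      (fun d k => d.insert k ([] : List (List (String × String))))
      (PySem.Dict.empty : PySem.Dict String (List (List (String × String)))) with hd0
  set d1 := S.foldl (fun d e => d.modify (pjDate e) [] (fun v => v ++ [e])) d0 with hd1
  -- A side: keys and values of the grouping dict
  have hAkeys : tl.keys = K := by
    rw [htl, PySem.Dict.keys_foldl_modify_key, PySem.Dict.keys_empty]; rfl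
  have hAnodup : tl.keys.Nodup := by
    rw [hAkeys, hK]; exact PySem.Set.nodup_ofList _
  have hAget : ∀ k, tl.getD k [] = valid.filter (fun e => pjDate e == k) := by
    intro k
    rw [htl, grouped_getD, PySem.Dict.getD_empty]
    simp
  -- B side: d0 registers exactly the keys K, all with value []
  have hd0items : d0.items = K.map (fun k => (k, ([] : List (List (String × String))))) := by
    rw [hd0, PySem.Dict.items_foldl_insert_fresh (k := fun x => x)]
    · show ([] : List (String × List (List (String × String)))) ++ _ = _
      rw [List.nil_append]
      simp [PySem.List.dedup, hK]
    · intro a _; exact PySem.Dict.contains_empty a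
    · simp only [List.map_id']
      exact PySem.Set.nodup_ofList _
  have hd0keys : d0.keys = K := by
    simp only [PySem.Dict.keys, hd0items, List.map_map]
    simp [Function.comp_def]
  have hd0get : ∀ k, d0.getD k [] = [] := by
    intro k
    rw [hd0]
    exact getD_foldl_insert_nil _ _ (fun k' => PySem.Dict.getD_empty k' []) k
  have hBkeys : d1.keys = K := by
    rw [hd1, PySem.Dict.keys_foldl_modify_key, hd0keys]
    apply set_update_of_subset
    intro x hx
    rcases List.mem_map.mp hx with ⟨e, he, rfl⟩
    have hev : e ∈ valid := (PySem.List.sorted_perm valid pjTs false).mem_iff.mp he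
    rw [hK]
    exact (PySem.Set.mem_ofList _ _).mpr (List.mem_map_of_mem hev)
  have hBnodup : d1.keys.Nodup := by
    rw [hBkeys, hK]; exact PySem.Set.nodup_ofList _
  have hBget : ∀ k, d1.getD k [] = S.filter (fun e => pjDate e == k) := by
    intro k
    rw [hd1, grouped_getD, hd0get]
    simp
  -- both outputs are K.map of the same per-key group
  rw [PySem.Dict.items_eq_map_keys tl hAnodup [], PySem.Dict.items_eq_map_keys d1 hBnodup [],
    hAkeys, hBkeys, List.map_map]
  apply List.map_congr_left
  intro k _
  simp only [Function.comp_apply, hAget k, hBget k, hS]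
  rw [filter_sorted]
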